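-- pv_equiv track=rewrite | github.com/scriptvolutionary/excel-autoprice | src/seasonal_price/infrastructure/excel/excel_processor.py | _resolve_sheet_name
-- ===== SOURCE A (Python) =====
-- def _resolve_sheet_name(sheet_names: list[str], expected_name: str) -> str | None:
--     for name in sheet_names:
--         if name == expected_name:
--             return name
--
--     expected_normalized = expected_name.strip().casefold()
--     for name in sheet_names:
--         if str(name).strip().casefold() == expected_normalized:
--             return name
--     return None
-- ===== SOURCE B (Python) =====
-- def _resolve_sheet_name(sheet_names: list[str], expected_name: str) -> str | None:
--     # Single pass: return on exact match; otherwise remember the first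
--     # normalized match and return it (or None) after the loop.
--     expected_normalized = expected_name.strip().casefold()
--     candidate = None
--     for name in sheet_names:
--         if name == expected_name:
--             return name
--         if candidate is None and str(name).strip().casefold() == expected_normalized:
--             candidate = name
--     return candidate
-- ===== Notes on version B (the rewrite author's own statement) =====
-- stated objective: alternative
-- what changed: Folds A's two sequential scans into one pass that returns on an exact match and carries the first normalized match as a candidate, normalizing each name at most once.
import Mathlib
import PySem

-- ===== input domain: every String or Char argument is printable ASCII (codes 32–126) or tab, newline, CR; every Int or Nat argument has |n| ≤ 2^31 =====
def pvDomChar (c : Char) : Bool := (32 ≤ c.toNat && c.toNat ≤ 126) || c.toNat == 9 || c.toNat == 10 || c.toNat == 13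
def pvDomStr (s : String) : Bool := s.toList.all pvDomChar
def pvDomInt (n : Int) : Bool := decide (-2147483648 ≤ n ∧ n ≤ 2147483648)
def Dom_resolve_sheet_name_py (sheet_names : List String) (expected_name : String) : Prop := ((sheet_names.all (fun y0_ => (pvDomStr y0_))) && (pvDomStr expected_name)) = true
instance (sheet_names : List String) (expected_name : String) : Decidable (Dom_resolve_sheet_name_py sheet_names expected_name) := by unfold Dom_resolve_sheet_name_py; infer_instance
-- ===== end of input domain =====

-- B folds A's two scans into one pass carrying the first normalized match; each name is normalized at most once.
-- ===== PORT A =====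
-- loop 1: return the first name equal to expected_name
-- loop 2: return the first name whose strip().casefold() equals the normalized expected name
-- (casefold = lower on the printable-ASCII domain)
def resolve_sheet_name_py (sheet_names : List String) (expected_name : String) : Option String :=
  match sheet_names.find? (fun name => name == expected_name) with
  | some name => some name
  | none =>
    let expected_normalized := PySem.Str.lower (PySem.Str.strip expected_name)
    sheet_names.find? (fun name => PySem.Str.lower (PySem.Str.strip name) == expected_normalized)

-- ===== PORT B =====
def resolveAltLoop (expected_name expected_normalized : String) :
    List String → Option String → Option String
  | [], candidate => candidate
  | name :: rest, candidate =>
    if name == expected_name then some name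
    else if candidate.isNone && (PySem.Str.lower (PySem.Str.strip name) == expected_normalized) then
      resolveAltLoop expected_name expected_normalized rest (some name)
    else
      resolveAltLoop expected_name expected_normalized rest candidate

def resolve_sheet_name_py_alt (sheet_names : List String) (expected_name : String) : Option String :=
  let expected_normalized := PySem.Str.lower (PySem.Str.strip expected_name)
  resolveAltLoop expected_name expected_normalized sheet_names none

-- ===== PRECONDITION & SPEC =====
def Spec_resolve_sheet_name_py (sheet_names : List String) (expected_name : String) (out : Option String) : Prop := out = resolve_sheet_name_py_alt sheet_names expected_name
instance (sheet_names : List String) (expected_name : String) (out : Option String) : Decidable (Spec_resolve_sheet_name_py sheet_names expected_name out) := by unfold Spec_resolve_sheet_name_py; infer_instance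

-- ===== CLAIM (what is proved, stated in full; the proofs are below) =====
def Claim_equal_resolve_sheet_name_py : Prop := ∀ (sheet_names : List String) (expected_name : String), Dom_resolve_sheet_name_py sheet_names expected_name → Spec_resolve_sheet_name_py sheet_names expected_name (resolve_sheet_name_py sheet_names expected_name)

-- ===== LEMMAS AND PROOFS =====

lemma resolveAltLoop_spec (e en : String) (l : List String) (c : Option String) :
    resolveAltLoop e en l c =
      match l.find? (fun name => name == e) with
      | some name => some name
      | none => (match c with
                 | some x => some x
                 | none => l.find? (fun name => PySem.Str.lower (PySem.Str.strip name) == en)) := by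
  induction l generalizing c with
  | nil => cases c <;> simp [resolveAltLoop]
  | cons h t ih =>
    simp only [resolveAltLoop, List.find?]
    by_cases hx : (h == e) = true
    · simp [hx]
    · simp only [hx, Bool.false_eq_true, if_false]
      cases c with
      | some x => simp [ih]
      | none =>
        by_cases hn : (PySem.Str.lower (PySem.Str.strip h) == en) = true
        · simp [hn, ih]
        · simp [hn, ih]

-- ===== VERDICT (by name: the statement is the Claim_ definition above) =====
theorem resolve_sheet_name_py_spec : Claim_equal_resolve_sheet_name_py := by
  intro sheet_names expected_name _
  unfold Spec_resolve_sheet_name_py resolve_sheet_name_py resolve_sheet_name_py_alt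
  rw [resolveAltLoop_spec]
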